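-- pv_equiv track=rewrite | github.com/flavr57/Amore-Mio | generate.py | _repair_json_html_attrs
-- ===== SOURCE A (Python) =====
-- def _repair_json_html_attrs(json_str: str) -> str:
--     """Fix unescaped double quotes inside HTML attribute values within JSON strings."""
--     result = []
--     in_string = False
--     escaped = False
--     i = 0
--     while i < len(json_str):
--         ch = json_str[i]
--         if escaped:
--             result.append(ch)
--             escaped = False
--             i += 1
--             continue
--         if ch == '\\' and in_string:
--             result.append(ch)
--             escaped = True
--             i += 1
--             continue
--         if ch == '"':
--             if not in_string:
--                 in_string = True
--                 result.append(ch)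
--             else:
--                 rest = json_str[i + 1:].lstrip()
--                 if rest and rest[0] in (':', ',', '}', ']', '\n', '\r'):
--                     in_string = False
--                     result.append(ch)
--                 else:
--                     result.append("'")
--             i += 1
--             continue
--         result.append(ch)
--         i += 1
--     return "".join(result)
-- ===== SOURCE B (Python) =====
-- def _repair_json_html_attrs(json_str: str) -> str:
--     """Fix unescaped double quotes inside HTML attribute values within JSON strings.
--
--     A precomputed next-non-whitespace index table replaces the per-quote
--     slice+lstrip, and escape pairs are consumed two at a time.
--     """
--     n = len(json_str)
--     # nxt[i] = smallest index j >= i with a non-whitespace character, or n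
--     nxt = [n] * (n + 1)
--     for i in range(n - 1, -1, -1):
--         nxt[i] = nxt[i + 1] if json_str[i].isspace() else i
--     out = []
--     in_string = False
--     i = 0
--     while i < n:
--         ch = json_str[i]
--         if ch == '\\' and in_string and i + 1 < n:
--             out.append(ch)
--             out.append(json_str[i + 1])
--             i += 2
--             continue
--         if ch == '"':
--             if not in_string:
--                 in_string = True
--                 out.append(ch)
--             else:
--                 j = nxt[i + 1]
--                 if j < n and json_str[j] in ':,}]':
--                     in_string = False
--                     out.append(ch)
--                 else:
--                     out.append("'")
--         else:
--             out.append(ch)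
--         i += 1
--     return "".join(out)
-- ===== Notes on version B (the rewrite author's own statement) =====
-- stated objective: alternative
-- what changed: Replaces A's per-closing-quote slice json_str[i+1:].lstrip() rescan with a precomputed next-non-whitespace index table (one backward pass) consulted in O(1), and consumes escape pairs two characters at a time.
import Mathlib
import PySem

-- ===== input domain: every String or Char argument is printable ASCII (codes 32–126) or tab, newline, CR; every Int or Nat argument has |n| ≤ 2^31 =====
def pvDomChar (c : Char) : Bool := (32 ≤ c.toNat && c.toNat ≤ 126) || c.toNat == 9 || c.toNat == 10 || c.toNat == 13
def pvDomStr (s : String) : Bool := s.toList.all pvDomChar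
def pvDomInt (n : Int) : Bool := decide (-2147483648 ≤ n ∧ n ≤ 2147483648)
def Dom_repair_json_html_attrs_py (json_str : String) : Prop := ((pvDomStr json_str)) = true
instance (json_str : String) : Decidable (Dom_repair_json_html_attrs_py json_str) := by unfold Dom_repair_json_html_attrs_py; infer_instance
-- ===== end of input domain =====

-- B replaces A's per-quote slice+lstrip rescans with one precomputed
-- next-non-whitespace index table consulted in O(1) per closing quote (objective: alternative).

-- ===== PORT A =====
-- the while-loop of A: state (i, in_string, escaped, result); ch = json_str[i] is written inline
def pvA_loop (cs : List Char) (i : Nat) (inS escaped : Bool) (acc : List Char) : List Char :=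
  if _h : i < cs.length then
    if escaped = true then
      pvA_loop cs (i+1) inS false (acc ++ [cs.getD i ' '])
    else if cs.getD i ' ' = '\\' ∧ inS = true then
      pvA_loop cs (i+1) inS true (acc ++ [cs.getD i ' '])
    else if cs.getD i ' ' = '"' then
      if inS = false then
        pvA_loop cs (i+1) true escaped (acc ++ [cs.getD i ' '])
      else
        -- rest = json_str[i+1:].lstrip(); 'rest and rest[0] in (...)'
        if PySem.Chars.lstrip (PySem.List.slice cs (some ((i + 1 : Nat) : Int)) none) ≠ [] ∧
            (PySem.Chars.lstrip (PySem.List.slice cs (some ((i + 1 : Nat) : Int)) none)).headD ' '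
              ∈ ([':', ',', '}', ']', '\n', '\r'] : List Char) then
          pvA_loop cs (i+1) false escaped (acc ++ [cs.getD i ' '])
        else
          pvA_loop cs (i+1) inS escaped (acc ++ ['\''])
    else
      pvA_loop cs (i+1) inS escaped (acc ++ [cs.getD i ' '])
  else acc
termination_by cs.length - i

def repair_json_html_attrs_py (json_str : String) : String :=
  String.ofList (pvA_loop json_str.toList 0 false false [])

-- ===== PORT B =====
-- backward pass of Source B: for i in range(n-1,-1,-1): nxt[i] = nxt[i+1] if s[i].isspace() else i
def pvB_nxtLoop (cs : List Char) (i : Nat) (nxt : List Nat) : List Nat :=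
  match i with
  | 0 => nxt
  | j + 1 =>
    pvB_nxtLoop cs j
      (nxt.set j (if PySem.Chars.isspace (cs.getD j ' ') then nxt.getD (j+1) cs.length else j))

def pvB_nxt (cs : List Char) : List Nat :=
  pvB_nxtLoop cs cs.length (List.replicate (cs.length + 1) cs.length)

-- the forward scan of Source B: state (i, in_string, out); ch = json_str[i], j = nxt[i+1] inline
def pvB_loop (cs : List Char) (nxt : List Nat) (i : Nat) (inS : Bool) (acc : List Char) : List Char :=
  if _h : i < cs.length then
    if cs.getD i ' ' = '\\' ∧ inS = true ∧ i + 1 < cs.length then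
      pvB_loop cs nxt (i+2) inS (acc ++ [cs.getD i ' ', cs.getD (i+1) ' '])
    else if cs.getD i ' ' = '"' then
      if inS = false then pvB_loop cs nxt (i+1) true (acc ++ [cs.getD i ' '])
      else
        if nxt.getD (i+1) cs.length < cs.length ∧
            cs.getD (nxt.getD (i+1) cs.length) ' ' ∈ ([':', ',', '}', ']'] : List Char) then
          pvB_loop cs nxt (i+1) false (acc ++ [cs.getD i ' '])
        else
          pvB_loop cs nxt (i+1) inS (acc ++ ['\''])
    else pvB_loop cs nxt (i+1) inS (acc ++ [cs.getD i ' '])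
  else acc
termination_by cs.length - i

def repair_json_html_attrs_py_alt (json_str : String) : String :=
  String.ofList (pvB_loop json_str.toList (pvB_nxt json_str.toList) 0 false [])

-- ===== PRECONDITION & SPEC =====
def Spec_repair_json_html_attrs_py (json_str : String) (out : String) : Prop := out = repair_json_html_attrs_py_alt json_str
instance (json_str : String) (out : String) : Decidable (Spec_repair_json_html_attrs_py json_str out) := by unfold Spec_repair_json_html_attrs_py; infer_instance

-- ===== CLAIM (what is proved, stated in full; the proofs are below) =====
def Claim_equal_repair_json_html_attrs_py : Prop := ∀ (json_str : String), Dom_repair_json_html_attrs_py json_str → Spec_repair_json_html_attrs_py json_str (repair_json_html_attrs_py json_str)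

-- ===== LEMMAS AND PROOFS =====

-- functional "first non-whitespace index at or after j" (proof helper)
def pvNextNW (cs : List Char) (j : Nat) : Nat :=
  if _h : j < cs.length then
    if PySem.Chars.isspace (cs.getD j ' ') then pvNextNW cs (j+1) else j
  else cs.length
termination_by cs.length - j

theorem pvNextNW_le (cs : List Char) (j : Nat) : pvNextNW cs j ≤ cs.length := by
  rw [pvNextNW]
  split
  · split
    · exact pvNextNW_le cs (j+1)
    · omega
  · omega
termination_by cs.length - j

theorem pvNextNW_not_space (cs : List Char) (j : Nat)
    (h : pvNextNW cs j < cs.length) :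
    PySem.Chars.isspace (cs.getD (pvNextNW cs j) ' ') = false := by
  by_cases hj : j < cs.length
  · by_cases hs : PySem.Chars.isspace (cs.getD j ' ') = true
    · rw [pvNextNW, dif_pos hj, if_pos hs] at h ⊢
      exact pvNextNW_not_space cs (j+1) h
    · rw [pvNextNW, dif_pos hj, if_neg hs] at h ⊢
      simpa using hs
  · rw [pvNextNW, dif_neg hj] at h
    omega
termination_by cs.length - j

theorem pvNextNW_dropWhile (cs : List Char) (j : Nat) :
    (cs.drop j).dropWhile PySem.Chars.isspace = cs.drop (pvNextNW cs j) := by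
  by_cases hj : j < cs.length
  · have hg : cs.getD j ' ' = cs[j] := List.getD_eq_getElem cs ' ' hj
    by_cases hs : PySem.Chars.isspace (cs.getD j ' ') = true
    · have h1 : pvNextNW cs j = pvNextNW cs (j+1) := by
        rw [pvNextNW, dif_pos hj, if_pos hs]
      rw [h1, List.drop_eq_getElem_cons hj, List.dropWhile_cons, if_pos (hg ▸ hs)]
      exact pvNextNW_dropWhile cs (j+1)
    · have h1 : pvNextNW cs j = j := by
        rw [pvNextNW, dif_pos hj, if_neg hs]
      rw [h1, List.drop_eq_getElem_cons hj, List.dropWhile_cons, if_neg (hg ▸ hs)]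
  · have h1 : pvNextNW cs j = cs.length := by rw [pvNextNW, dif_neg hj]
    rw [h1, List.drop_eq_nil_of_le (by omega), List.drop_length]
    simp
termination_by cs.length - j

-- the table built by pvB_nxtLoop computes pvNextNW
theorem pvB_nxtLoop_getD (cs : List Char) (i : Nat) (a : List Nat)
    (hs : a.length = cs.length + 1) (hi : i ≤ cs.length)
    (hinv : ∀ k, i ≤ k → k ≤ cs.length → a.getD k cs.length = pvNextNW cs k) :
    ∀ k, k ≤ cs.length → (pvB_nxtLoop cs i a).getD k cs.length = pvNextNW cs k := by
  induction i generalizing a with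
  | zero =>
    intro k hk
    simpa [pvB_nxtLoop] using hinv k (Nat.zero_le k) hk
  | succ j ih =>
    intro k hk
    rw [pvB_nxtLoop]
    apply ih
    · simp [hs]
    · omega
    · intro m hm hmn
      by_cases hmj : m = j
      · subst hmj
        have hlt : m < a.length := by omega
        rw [show (a.set m (if PySem.Chars.isspace (cs.getD m ' ') then a.getD (m+1) cs.length else m)).getD m cs.length
              = (if PySem.Chars.isspace (cs.getD m ' ') then a.getD (m+1) cs.length else m) by
            simp [List.getD_eq_getElem?_getD, hlt]]
        rw [hinv (m+1) (by omega) (by omega)]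
        have hm' : m < cs.length := by omega
        conv_rhs => rw [pvNextNW]
        rw [dif_pos hm']
      · rw [show (a.set j (if PySem.Chars.isspace (cs.getD j ' ') then a.getD (j+1) cs.length else j)).getD m cs.length
              = a.getD m cs.length by
            simp [List.getD_eq_getElem?_getD, Ne.symm hmj]]
        exact hinv m (by omega) hmn
    · exact hk

theorem pvB_nxt_getD (cs : List Char) (k : Nat) (hk : k ≤ cs.length) :
    (pvB_nxt cs).getD k cs.length = pvNextNW cs k := by
  apply pvB_nxtLoop_getD cs cs.length _ (by simp) (le_refl _) _ k hk
  intro m hm hmn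
  have hme : m = cs.length := by omega
  subst hme
  rw [pvNextNW, dif_neg (by omega)]
  simp [List.getD_eq_getElem?_getD]

-- the two scans agree from any non-escaped state
theorem pvHeadD_drop (cs : List Char) (m : Nat) :
    (cs.drop m).headD ' ' = cs.getD m ' ' := by
  simp [List.headD_eq_head?_getD, List.head?_drop, List.getD_eq_getElem?_getD]

theorem pvMain (cs : List Char) (fuel : Nat) :
    ∀ i inS acc, cs.length ≤ i + fuel →
      pvA_loop cs i inS false acc = pvB_loop cs (pvB_nxt cs) i inS acc := by
  induction fuel with
  | zero =>
    intro i inS acc hf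
    have hni : ¬ i < cs.length := by omega
    rw [pvA_loop, pvB_loop, dif_neg hni, dif_neg hni]
  | succ f ih =>
    intro i inS acc hf
    by_cases hi : i < cs.length
    · rw [pvA_loop, pvB_loop, dif_pos hi, dif_pos hi]
      cases inS with
      | false =>
        simp only [Bool.false_eq_true, false_and, and_false, if_false, if_true]
        by_cases hq : cs.getD i ' ' = '"'
        · rw [if_pos hq, if_pos hq]
          exact ih (i+1) true _ (by omega)
        · rw [if_neg hq, if_neg hq]
          exact ih (i+1) false _ (by omega)
      | true =>
        simp only [Bool.false_eq_true, Bool.true_eq_false, if_false, true_and, and_true]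
        by_cases hch : cs.getD i ' ' = '\\'
        · -- backslash inside a string
          by_cases hnext : i + 1 < cs.length
          · rw [if_pos hch, if_pos ⟨hch, hnext⟩]
            rw [pvA_loop, dif_pos hnext, if_pos rfl]
            rw [show acc ++ [cs.getD i ' '] ++ [cs.getD (i+1) ' ']
                  = acc ++ [cs.getD i ' ', cs.getD (i+1) ' '] by simp]
            exact ih (i+2) true _ (by omega)
          · rw [if_pos hch, if_neg (fun h => hnext h.2),
                if_neg (by rw [hch]; decide)]
            rw [pvA_loop, dif_neg hnext, pvB_loop, dif_neg hnext]
        · rw [if_neg hch, if_neg (show ¬(cs.getD i ' ' = '\\' ∧ i + 1 < cs.length) from fun h => hch h.1)]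
          by_cases hq : cs.getD i ' ' = '"'
          · rw [if_pos hq, if_pos hq]
            -- the two membership tests agree
            have hrest : PySem.Chars.lstrip (PySem.List.slice cs (some ((i + 1 : Nat) : Int)) none)
                = cs.drop (pvNextNW cs (i+1)) := by
              rw [PySem.List.slice_from_natCast]
              exact pvNextNW_dropWhile cs (i+1)
            have htbl : (pvB_nxt cs).getD (i+1) cs.length = pvNextNW cs (i+1) :=
              pvB_nxt_getD cs (i+1) (by omega)
            have hcond :
                (PySem.Chars.lstrip (PySem.List.slice cs (some ((i + 1 : Nat) : Int)) none) ≠ [] ∧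
                  (PySem.Chars.lstrip (PySem.List.slice cs (some ((i + 1 : Nat) : Int)) none)).headD ' '
                    ∈ ([':', ',', '}', ']', '\n', '\r'] : List Char))
                ↔ ((pvB_nxt cs).getD (i+1) cs.length < cs.length ∧
                    cs.getD ((pvB_nxt cs).getD (i+1) cs.length) ' ' ∈ ([':', ',', '}', ']'] : List Char)) := by
              rw [hrest, htbl, pvHeadD_drop cs (pvNextNW cs (i+1))]
              have hle := pvNextNW_le cs (i+1)
              constructor
              · rintro ⟨hne, hmem⟩
                have hmlt : pvNextNW cs (i+1) < cs.length := by
                  by_contra hge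
                  exact hne (List.drop_eq_nil_of_le (by omega))
                have hns := pvNextNW_not_space cs (i+1) hmlt
                refine ⟨hmlt, ?_⟩
                simp only [List.mem_cons, List.not_mem_nil, or_false] at hmem ⊢
                rcases hmem with h | h | h | h | h | h
                · exact Or.inl h
                · exact Or.inr (Or.inl h)
                · exact Or.inr (Or.inr (Or.inl h))
                · exact Or.inr (Or.inr (Or.inr h))
                · rw [h] at hns; exact absurd hns (by decide)
                · rw [h] at hns; exact absurd hns (by decide)
              · rintro ⟨hmlt, hmem⟩
                have hne : cs.drop (pvNextNW cs (i+1)) ≠ [] := by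
                  simp only [ne_eq, List.drop_eq_nil_iff]
                  omega
                refine ⟨hne, ?_⟩
                simp only [List.mem_cons, List.not_mem_nil, or_false] at hmem ⊢
                tauto
            by_cases hc : PySem.Chars.lstrip (PySem.List.slice cs (some ((i + 1 : Nat) : Int)) none) ≠ [] ∧
                (PySem.Chars.lstrip (PySem.List.slice cs (some ((i + 1 : Nat) : Int)) none)).headD ' '
                  ∈ ([':', ',', '}', ']', '\n', '\r'] : List Char)
            · rw [if_pos hc, if_pos (hcond.mp hc)]
              exact ih (i+1) false _ (by omega)
            · rw [if_neg hc, if_neg (fun h => hc (hcond.mpr h))]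
              exact ih (i+1) true _ (by omega)
          · -- ordinary character
            rw [if_neg hq, if_neg hq]
            exact ih (i+1) true _ (by omega)
    · rw [pvA_loop, pvB_loop, dif_neg hi, dif_neg hi]

-- ===== VERDICT (by name: the statement is the Claim_ definition above) =====
theorem repair_json_html_attrs_py_spec : Claim_equal_repair_json_html_attrs_py := by
  intro s _
  unfold Spec_repair_json_html_attrs_py repair_json_html_attrs_py repair_json_html_attrs_py_alt
  rw [pvMain s.toList s.toList.length 0 false [] (by omega)]
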